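-- pv_equiv track=rewrite | github.com/SiddheshP1996/GFG-POTD-Daily | 2024/10 GFG-POTD-Daily-October-2024/25 Alternative-Sorting.py | alternateSort
-- ===== SOURCE A (Python) =====
-- def alternateSort(arr):
--     # Your code goes here
--     arr.sort()
--     result = []
--     leftElement, rightElement = 0, len(arr) - 1
--
--     while leftElement <= rightElement:
--         if leftElement <= rightElement:
--             result.append(arr[rightElement])
--             rightElement -= 1
--
--         if leftElement <= rightElement:
--             result.append(arr[leftElement])
--             leftElement += 1
--
--     return result
-- ===== SOURCE B (Python) =====
-- def alternateSort(arr):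
--     # B: sort (in place, like A), split into halves, interleave top/bottom.
--     arr.sort()
--     n = len(arr)
--     top = arr[n // 2:][::-1]
--     bottom = arr[:n // 2]
--     result = []
--     for big, small in zip(top, bottom):
--         result.append(big)
--         result.append(small)
--     if len(top) > len(bottom):
--         result.append(top[-1])
--     return result
-- ===== Notes on version B (the rewrite author's own statement) =====
-- stated objective: simpler
-- what changed: Replaces A's two-pointer while loop walking inward over the sorted array with a split of the sorted array into a descending top half and ascending bottom half that are zipped pairwise (plus the leftover middle element for odd lengths).
import Mathlib
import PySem

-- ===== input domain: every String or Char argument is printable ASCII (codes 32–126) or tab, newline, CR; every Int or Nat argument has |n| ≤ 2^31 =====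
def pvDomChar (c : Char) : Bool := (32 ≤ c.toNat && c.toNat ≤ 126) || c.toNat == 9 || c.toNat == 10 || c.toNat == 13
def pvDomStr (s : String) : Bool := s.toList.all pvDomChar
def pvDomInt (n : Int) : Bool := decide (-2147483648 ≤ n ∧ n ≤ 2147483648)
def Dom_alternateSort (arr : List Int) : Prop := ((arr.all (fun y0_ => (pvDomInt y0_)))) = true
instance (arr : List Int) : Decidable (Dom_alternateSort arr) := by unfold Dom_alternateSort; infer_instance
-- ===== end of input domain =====

-- B builds the answer by splitting the sorted list into two halves and zipping them, instead of
-- A's two-pointer while loop (objective: simpler decomposition). Both Pythons sort arr in place;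
-- the equivalence proved here is about the return value.

-- ===== PORT A =====
-- A's two-pointer while loop, step for step (pyGetD is exact here: both indices stay in range
-- whenever the loop body reads them)
def alternateSortLoop (arr : List Int) (l r : Int) (acc : List Int) : List Int :=
  if l ≤ r then
    let acc1 := acc ++ [PySem.List.pyGetD arr r 0]
    let r1 := r - 1
    if l ≤ r1 then
      alternateSortLoop arr (l + 1) r1 (acc1 ++ [PySem.List.pyGetD arr l 0])
    else
      alternateSortLoop arr l r1 acc1
  else acc
termination_by (r + 1 - l).toNat
decreasing_by all_goals omega

def alternateSort (arr : List Int) : List Int :=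
  let a := PySem.List.sorted arr (fun x => x) false
  alternateSortLoop a 0 ((a.length : Int) - 1) []

-- ===== PORT B =====
def alternateSort_alt (arr : List Int) : List Int :=
  let a := PySem.List.sorted arr (fun x => x) false
  let n := a.length
  let top := (a.drop (n / 2)).reverse
  let bottom := a.take (n / 2)
  let result := (top.zip bottom).foldl (fun acc p => acc ++ [p.1, p.2]) []
  if top.length > bottom.length then result ++ [PySem.List.pyGetD top (-1) 0] else result

-- ===== PRECONDITION & SPEC =====
def Spec_alternateSort (arr : List Int) (out : List Int) : Prop := out = alternateSort_alt arr
instance (arr : List Int) (out : List Int) : Decidable (Spec_alternateSort arr out) := by unfold Spec_alternateSort; infer_instance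

-- ===== CLAIM (what is proved, stated in full; the proofs are below) =====
def Claim_equal_alternateSort : Prop := ∀ (arr : List Int), Dom_alternateSort arr → Spec_alternateSort arr (alternateSort arr)

-- ===== LEMMAS AND PROOFS =====

-- the common "outside-in" interleaving both programs compute on the sorted list
def interleaveEnds (xs : List Int) : List Int :=
  if _h : xs.length ≤ 1 then xs
  else xs.getLastD 0 :: xs.headD 0 :: interleaveEnds xs.dropLast.tail
termination_by xs.length
decreasing_by simp [List.length_tail, List.length_dropLast]; omega

lemma len_one_eq (ys : List Int) (h : ys.length = 1) : ys = [ys.getLastD 0] := by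
  match ys, h with
  | [y], _ => rfl

lemma loopA_eq (k : Nat) : ∀ (xs : List Int) (l r : Int) (acc : List Int),
    0 ≤ l → r < (xs.length : Int) → (r + 1 - l).toNat = k →
    alternateSortLoop xs l r acc = acc ++ interleaveEnds ((xs.drop l.toNat).take k) := by
  induction k using Nat.strong_induction_on with
  | _ k ih =>
    intro xs l r acc hl hr hk
    rw [alternateSortLoop]
    by_cases hle : l ≤ r
    · simp only [hle, if_true]
      set seg := (xs.drop l.toNat).take k with hseg
      have hklen : k ≤ xs.length - l.toNat := by omega
      have hsl : seg.length = k := by simp [hseg]; omega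
      have hget : ∀ i : Nat, i < k → seg[i]? = xs[l.toNat + i]? := by
        intro i hi
        rw [hseg]
        rw [List.getElem?_take_of_lt hi, List.getElem?_drop]
      have hlast : PySem.List.pyGetD xs r 0 = seg.getLastD 0 := by
        have h1 : PySem.List.pyGetD xs r 0 = xs[r.toNat] := PySem.List.pyGetD_eq_getElem xs 0 (by omega) hr
        have h2 : seg.getLastD 0 = seg[k-1]'(by omega) := by
          rw [List.getLastD_eq_getLast?, List.getLast?_eq_getElem?,
            List.getElem?_eq_getElem (by omega : seg.length - 1 < seg.length)]
          simp [hsl]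
        have h3 := hget (k-1) (by omega)
        rw [List.getElem?_eq_getElem (by omega), List.getElem?_eq_getElem (by omega)] at h3
        have : l.toNat + (k-1) = r.toNat := by omega
        simp_all
      by_cases hle2 : l ≤ r - 1
      · simp only [hle2, if_true]
        have hk2 : (r - 1 + 1 - (l + 1)).toNat = k - 2 := by omega
        rw [ih (k-2) (by omega) xs (l+1) (r-1) _ (by omega) (by omega) hk2]
        have hhead : PySem.List.pyGetD xs l 0 = seg.headD 0 := by
          have h1 : PySem.List.pyGetD xs l 0 = xs[l.toNat] := PySem.List.pyGetD_eq_getElem xs 0 hl (by omega)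
          have h3 := hget 0 (by omega)
          rw [List.getElem?_eq_getElem (by omega), List.getElem?_eq_getElem (by omega)] at h3
          rw [List.headD_eq_head?_getD, List.head?_eq_getElem?, List.getElem?_eq_getElem (by omega)]
          simp_all
        have hseg2 : seg.dropLast.tail = (xs.drop (l+1).toNat).take (k-2) := by
          apply List.ext_getElem
          · simp [hsl]; omega
          · intro i hi1 hi2
            have hi : i < k - 2 := by simp [hsl] at hi1; omega
            have e1 : seg.dropLast.tail[i]'hi1 = seg[i+1]'(by omega) := by
              rw [List.getElem_tail, List.getElem_dropLast]
            have e2 := hget (i+1) (by omega)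
            rw [List.getElem?_eq_getElem (by omega), List.getElem?_eq_getElem (by omega)] at e2
            have e3 : ((xs.drop (l+1).toNat).take (k-2))[i]'hi2 = xs[(l+1).toNat + i]'(by simp at hi2 ⊢; omega) := by
              rw [List.getElem_take, List.getElem_drop]
            have : (l+1).toNat + i = l.toNat + (i+1) := by omega
            simp_all
        rw [hseg2.symm]
        have hIE : interleaveEnds seg = seg.getLastD 0 :: seg.headD 0 :: interleaveEnds seg.dropLast.tail := by
          rw [interleaveEnds]; simp only [hsl]
          rw [dif_neg (by omega)]
        rw [hIE, hlast, hhead]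
        simp
      · -- k = 1 : second if false, recursive call with r-1 < l terminates immediately
        simp only [hle2, if_false]
        have hk1 : k = 1 := by omega
        rw [alternateSortLoop, if_neg (by omega)]
        have hIE : interleaveEnds seg = seg := by rw [interleaveEnds]; rw [dif_pos (by omega)]
        rw [hIE, len_one_eq seg (by omega), hlast]
    · simp only [hle, if_false]
      have hk0 : k = 0 := by omega
      subst hk0
      simp [interleaveEnds]

lemma foldl_pairs (ps : List (Int × Int)) (acc : List Int) :
    ps.foldl (fun acc p => acc ++ [p.1, p.2]) acc = acc ++ ps.flatMap (fun p => [p.1, p.2]) := by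
  induction ps generalizing acc with
  | nil => simp
  | cons p ps ih => simp [List.foldl_cons, ih]

def bBody (a : List Int) : List Int :=
  if ((a.drop (a.length / 2)).reverse).length > (a.take (a.length / 2)).length
  then (((a.drop (a.length / 2)).reverse).zip (a.take (a.length / 2))).foldl
         (fun acc p => acc ++ [p.1, p.2]) [] ++ [PySem.List.pyGetD ((a.drop (a.length / 2)).reverse) (-1) 0]
  else (((a.drop (a.length / 2)).reverse).zip (a.take (a.length / 2))).foldl
         (fun acc p => acc ++ [p.1, p.2]) []

lemma b_core_aux (n : Nat) : ∀ (a : List Int), a.length ≤ n → bBody a = interleaveEnds a := by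
  induction n with
  | zero =>
    intro a ha
    have : a = [] := List.length_eq_zero_iff.mp (by omega)
    subst this
    simp [bBody, interleaveEnds]
  | succ n ihn =>
    intro a ha
    match a with
    | [] => simp [bBody, interleaveEnds]
    | (x :: t) =>
      rcases t.eq_nil_or_concat with hnil | ⟨m, y, hmy⟩
      case inl =>
        subst hnil
        simp [bBody, interleaveEnds, PySem.List.pyGetD, PySem.List.pyGet?, PySem.List.pyIdx?]
      rw [List.concat_eq_append] at hmy
      subst hmy
      have ih := ihn m (by simp at ha; omega)
      have hhalf : (x :: (m ++ [y])).length / 2 = m.length / 2 + 1 := by simp; omega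
      have htake : (x :: (m ++ [y])).take ((x :: (m ++ [y])).length / 2)
          = x :: m.take (m.length / 2) := by
        rw [hhalf, List.take_succ_cons, List.take_append_of_le_length (by omega)]
      have hrev : ((x :: (m ++ [y])).drop ((x :: (m ++ [y])).length / 2)).reverse
          = y :: (m.drop (m.length / 2)).reverse := by
        rw [hhalf, List.drop_succ_cons, List.drop_append_of_le_length (by omega)]
        simp
      have hIE : interleaveEnds (x :: (m ++ [y])) = y :: x :: interleaveEnds m := by
        rw [interleaveEnds]
        rw [dif_neg (by simp)]
        have h1 : (x :: (m ++ [y])).getLastD 0 = y := by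
          rw [List.getLastD_eq_getLast?, show x :: (m ++ [y]) = (x :: m) ++ [y] by simp,
              List.getLast?_concat]
          rfl
        have h2 : (x :: (m ++ [y])).dropLast.tail = m := by
          rw [show x :: (m ++ [y]) = (x :: m) ++ [y] by simp, List.dropLast_concat]
          rfl
        rw [h1, h2]
        rfl
      set topm := (m.drop (m.length / 2)).reverse with htopm
      set botm := m.take (m.length / 2) with hbotm
      unfold bBody
      rw [hIE, hrev, htake]
      have hzip : (y :: topm).zip (x :: botm) = (y, x) :: topm.zip botm := rfl
      rw [hzip]
      have hfold :
          ((y, x) :: topm.zip botm).foldl (fun acc p => acc ++ [p.1, p.2]) []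
            = y :: x :: (topm.zip botm).foldl (fun acc p => acc ++ [p.1, p.2]) [] := by
        rw [List.foldl_cons, foldl_pairs, foldl_pairs]
        rfl
      unfold bBody at ih
      by_cases hc : topm.length > botm.length
      · rw [if_pos (by simp; omega)]
        have htopm_ne : topm ≠ [] := by
          intro h; rw [h] at hc; simp at hc
        have hgl : PySem.List.pyGetD (y :: topm) (-1) 0 = PySem.List.pyGetD topm (-1) 0 := by
          rw [PySem.List.pyGetD_neg_one (y :: topm) 0 (by simp),
              PySem.List.pyGetD_neg_one topm 0 htopm_ne]
          exact List.getLast_cons htopm_ne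
        rw [hfold, hgl]
        rw [if_pos hc] at ih
        rw [← ih]
        simp only [foldl_pairs, List.nil_append, List.cons_append]
        rfl
      · rw [if_neg (by simp; omega)]
        rw [hfold]
        rw [if_neg hc] at ih
        rw [← ih]

lemma b_core (a : List Int) : bBody a = interleaveEnds a := b_core_aux a.length a le_rfl

-- ===== VERDICT (by name: the statement is the Claim_ definition above) =====
theorem alternateSort_spec : Claim_equal_alternateSort := by
  intro arr _
  unfold Spec_alternateSort alternateSort alternateSort_alt
  set a := PySem.List.sorted arr (fun x => x) false with ha
  have h1 := loopA_eq a.length a 0 ((a.length : Int) - 1) [] (by omega) (by omega) (by omega)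
  have h2 := b_core a
  unfold bBody at h2
  simp only [Int.toNat_zero, List.drop_zero, List.take_length] at h1
  simp only []
  rw [h1, h2]
  simp
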